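-- pv_equiv track=rewrite | github.com/Muz-guzgu/bkaczmarczyk | matura/matura 2023 czerwiec/zad 3.py | zad_3_2
-- ===== SOURCE A (Python) =====
-- def zad_3_2(dane):
--     liczba_kombinacji_max = 0
--     lista_wierszy = []
--     for wiersz in dane:
--         if len(wiersz) == 8:
--             liczba_zer = wiersz.count("0")
--             liczba_jedynek = wiersz.count("1")
--             liczba_kombinacji = min(liczba_zer, liczba_jedynek - 1)
--             if liczba_kombinacji > liczba_kombinacji_max:
--                 liczba_kombinacji_max = liczba_kombinacji
--                 lista_wierszy = [wiersz]
--             elif liczba_kombinacji == liczba_kombinacji_max: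
--                 lista_wierszy.append(wiersz)
--     return "\n".join(lista_wierszy)
-- ===== SOURCE B (Python) =====
-- def zad_3_2(dane):
--     def value(w):
--         return min(w.count("0"), w.count("1") - 1)
--     vals = [value(w) for w in dane if len(w) == 8]
--     M = max(max(vals, default=0), 0)
--     return "\n".join(w for w in dane if len(w) == 8 and value(w) == M)
-- ===== Notes on version B (the rewrite author's own statement) =====
-- stated objective: simpler
-- what changed: Replaces the online max-tracking accumulate loop with a two-pass decomposition: first compute M = max(0, values of 8-char rows), then filter the rows whose value equals M.
import Mathlib
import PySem

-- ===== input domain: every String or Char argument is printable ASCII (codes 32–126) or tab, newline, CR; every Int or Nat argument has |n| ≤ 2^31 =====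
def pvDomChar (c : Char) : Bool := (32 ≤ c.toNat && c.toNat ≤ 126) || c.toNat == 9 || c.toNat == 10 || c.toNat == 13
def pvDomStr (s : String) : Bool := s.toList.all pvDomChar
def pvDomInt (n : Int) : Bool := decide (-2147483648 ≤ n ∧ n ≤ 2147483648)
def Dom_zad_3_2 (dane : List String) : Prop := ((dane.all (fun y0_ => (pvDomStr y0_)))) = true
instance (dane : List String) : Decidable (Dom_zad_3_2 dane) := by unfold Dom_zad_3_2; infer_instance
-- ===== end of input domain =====

-- B replaces A's online max-tracking accumulate loop with a simpler two-pass
-- "compute the max, then filter" decomposition; same return value everywhere.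

-- ===== PORT A =====
-- one iteration of A's for-loop over the state (liczba_kombinacji_max, lista_wierszy)
def pvStepA (st : Int × List String) (wiersz : String) : Int × List String :=
  if PySem.Str.len wiersz = 8 then
    let liczba_zer : Int := PySem.Str.count wiersz "0"
    let liczba_jedynek : Int := PySem.Str.count wiersz "1"
    let liczba_kombinacji : Int := min liczba_zer (liczba_jedynek - 1)
    if liczba_kombinacji > st.1 then (liczba_kombinacji, [wiersz])
    else if liczba_kombinacji = st.1 then (st.1, st.2 ++ [wiersz])
    else st
  else st

def zad_3_2 (dane : List String) : String :=
  PySem.Str.join "\n" (dane.foldl pvStepA (0, [])).2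

-- ===== PORT B =====
-- value(w) = min(w.count("0"), w.count("1") - 1)
def pvValue (w : String) : Int :=
  min ((PySem.Str.count w "0" : Int)) ((PySem.Str.count w "1" : Int) - 1)

-- vals = [value(w) for w in dane if len(w) == 8]; M = max(max(vals, default=0), 0)
def pvMaxB (dane : List String) : Int :=
  max (match (dane.filter (fun w => PySem.Str.len w == 8)).map pvValue with
       | [] => 0
       | h :: t => t.foldl max h) 0

def zad_3_2_alt (dane : List String) : String :=
  PySem.Str.join "\n"
    (dane.filter (fun w => PySem.Str.len w == 8 && pvValue w == pvMaxB dane))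

-- ===== PRECONDITION & SPEC =====
def Spec_zad_3_2 (dane : List String) (out : String) : Prop := out = zad_3_2_alt dane
instance (dane : List String) (out : String) : Decidable (Spec_zad_3_2 dane out) := by unfold Spec_zad_3_2; infer_instance

-- ===== CLAIM (what is proved, stated in full; the proofs are below) =====
def Claim_equal_zad_3_2 : Prop := ∀ (dane : List String), Dom_zad_3_2 dane → Spec_zad_3_2 dane (zad_3_2 dane)

-- ===== LEMMAS AND PROOFS =====

-- running max of the values of 8-char rows, seeded with m
def pvMf (l : List String) (m : Int) : Int :=
  l.foldl (fun m w => if PySem.Str.len w = 8 then max m (pvValue w) else m) m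

lemma pvMf_le (l : List String) (m : Int) : m ≤ pvMf l m := by
  induction l generalizing m with
  | nil => simp [pvMf]
  | cons w t ih =>
    have h := ih (if PySem.Str.len w = 8 then max m (pvValue w) else m)
    refine le_trans ?_ h
    split_ifs <;> simp

-- invariant of A's loop: after any suffix, the max is the running max and the
-- list is everything collected so far plus the suffix's rows of that value
lemma pvLoopA (l : List String) (m : Int) (acc : List String) :
    l.foldl pvStepA (m, acc)
      = (pvMf l m,
         (if pvMf l m = m then acc else []) ++
           l.filter (fun w => PySem.Str.len w == 8 && pvValue w == pvMf l m)) := by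
  induction l generalizing m acc with
  | nil => simp [pvMf]
  | cons w t ih =>
    rw [List.foldl_cons]
    by_cases hw : PySem.Str.len w = 8
    · have hb : (PySem.Str.len w == 8) = true := beq_iff_eq.mpr hw
      have hstep : pvStepA (m, acc) w =
          (if pvValue w > m then (pvValue w, [w])
           else if pvValue w = m then (m, acc ++ [w]) else (m, acc)) := by
        unfold pvStepA
        rw [if_pos hw]
        rfl
      have hMf : pvMf (w :: t) m = pvMf t (max m (pvValue w)) := by
        simp only [pvMf, List.foldl_cons, if_pos hw]
      rcases lt_trichotomy m (pvValue w) with hlt | heq | hgt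
      · -- pvValue w > m : reset the list to [w]
        have hmax : max m (pvValue w) = pvValue w := max_eq_right hlt.le
        have hge := pvMf_le t (pvValue w)
        rw [hstep, if_pos hlt, ih, hMf, hmax,
            if_neg (by omega : ¬ pvMf t (pvValue w) = m), List.filter_cons, hb]
        by_cases hv : pvValue w = pvMf t (pvValue w)
        · rw [if_pos hv.symm, beq_iff_eq.mpr hv]
          simp
        · rw [if_neg (fun h => hv h.symm), beq_eq_false_iff_ne.mpr hv]
          simp
      · -- pvValue w = m : append w
        have hmax : max m (pvValue w) = m := max_eq_left heq.symm.le
        rw [hstep, if_neg (by omega : ¬ pvValue w > m), if_pos heq.symm, ih, hMf, hmax,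
            List.filter_cons, hb]
        by_cases he : pvMf t m = m
        · rw [if_pos he, if_pos he]
          simp [← heq, he]
        · rw [if_neg he, if_neg he]
          have hv : ¬ pvValue w = pvMf t m := by omega
          simp [hv]
      · -- pvValue w < m : skip
        have hmax : max m (pvValue w) = m := max_eq_left hgt.le
        have hge := pvMf_le t m
        rw [hstep, if_neg (by omega : ¬ pvValue w > m),
            if_neg (by omega : ¬ pvValue w = m), ih, hMf, hmax, List.filter_cons, hb]
        have hv : ¬ pvValue w = pvMf t m := by omega
        simp [hv]
    · have hb : (PySem.Str.len w == 8) = false := beq_eq_false_iff_ne.mpr hw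
      have hstep : pvStepA (m, acc) w = (m, acc) := by
        unfold pvStepA
        rw [if_neg hw]
      have hMf : pvMf (w :: t) m = pvMf t m := by
        simp only [pvMf, List.foldl_cons, if_neg hw]
      rw [hstep, ih, hMf, List.filter_cons, hb]
      simp

lemma foldl_max_init (l : List Int) : ∀ a b : Int, l.foldl max (max a b) = max (l.foldl max a) b := by
  induction l with
  | nil => intro a b; simp
  | cons c t ih =>
    intro a b
    simp only [List.foldl_cons]
    rw [max_right_comm, ih]

lemma pvMf_eq_filter (l : List String) (m : Int) :
    pvMf l m = ((l.filter (fun w => PySem.Str.len w == 8)).map pvValue).foldl max m := by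
  induction l generalizing m with
  | nil => simp [pvMf]
  | cons w t ih =>
    by_cases hw : PySem.Str.len w = 8
    · have hb : (PySem.Str.len w == 8) = true := beq_iff_eq.mpr hw
      have hMf : pvMf (w :: t) m = pvMf t (max m (pvValue w)) := by
        simp only [pvMf, List.foldl_cons, if_pos hw]
      rw [hMf, ih, List.filter_cons, hb]
      simp
    · have hb : (PySem.Str.len w == 8) = false := beq_eq_false_iff_ne.mpr hw
      have hMf : pvMf (w :: t) m = pvMf t m := by
        simp only [pvMf, List.foldl_cons, if_neg hw]
      rw [hMf, ih, List.filter_cons, hb]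
      simp

lemma pvMaxB_eq (dane : List String) : pvMaxB dane = pvMf dane 0 := by
  unfold pvMaxB
  rw [pvMf_eq_filter]
  cases h : (dane.filter (fun w => PySem.Str.len w == 8)).map pvValue with
  | nil => simp
  | cons v vs =>
    simp only [List.foldl_cons]
    rw [max_comm (0 : Int) v, foldl_max_init]

-- ===== VERDICT (by name: the statement is the Claim_ definition above) =====
theorem zad_3_2_spec : Claim_equal_zad_3_2 := by
  intro dane _
  show zad_3_2 dane = zad_3_2_alt dane
  unfold zad_3_2 zad_3_2_alt
  rw [pvLoopA]
  simp only [pvMaxB_eq]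
  split_ifs <;> simp
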